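-- pv_equiv track=rewrite | github.com/kammitama5/Distracting_KATAS | uniquesum.py | unique_sum
-- ===== SOURCE A (Python) =====
-- def unique_sum(n):
--     if len(n) == 0:
--         return None
--     else:
--
--         bum = list(set(n))
--         counter = 0
--         for i in bum:
--           counter = counter + i
--
--         return counter
-- ===== SOURCE B (Python) =====
-- def unique_sum(n):
--     if len(n) == 0:
--         return None
--     s = sorted(n)
--     total = 0
--     prev = None
--     for x in s:
--         if prev is None or x != prev:
--             total = total + x
--         prev = x
--     return total
-- ===== Notes on version B (the rewrite author's own statement) =====
-- stated objective: alternative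
-- what changed: Deduplicates by sorting a copy and skipping adjacent equal elements in one pass, instead of building a set and summing it.
import Mathlib
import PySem

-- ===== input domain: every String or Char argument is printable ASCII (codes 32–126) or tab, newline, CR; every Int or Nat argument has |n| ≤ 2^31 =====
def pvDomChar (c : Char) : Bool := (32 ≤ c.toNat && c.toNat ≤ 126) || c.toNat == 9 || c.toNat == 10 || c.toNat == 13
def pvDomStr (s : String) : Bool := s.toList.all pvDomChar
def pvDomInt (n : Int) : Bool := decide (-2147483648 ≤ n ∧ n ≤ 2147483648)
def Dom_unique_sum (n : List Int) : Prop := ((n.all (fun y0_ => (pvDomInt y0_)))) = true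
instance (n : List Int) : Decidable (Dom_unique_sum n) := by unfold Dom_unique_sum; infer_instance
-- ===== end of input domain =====

-- B deduplicates by sorting a copy and skipping adjacent equal elements in one pass,
-- instead of summing a set; same result, a genuinely different traversal.

-- ===== PORT A =====
def unique_sum (n : List Int) : Option Int :=
  if n.length = 0 then none
  else
    let bum := PySem.Set.ofList n
    some (bum.foldl (fun counter i => counter + i) 0)

-- ===== PORT B =====
def unique_sum_alt (n : List Int) : Option Int :=
  if n.length = 0 then none
  else
    let s := PySem.List.sorted n (fun x => x) false
    let r := s.foldl
      (fun (tp : Int × Option Int) x =>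
        (if tp.2 = none ∨ tp.2 ≠ some x then tp.1 + x else tp.1, some x))
      (0, none)
    some r.1

-- ===== PRECONDITION & SPEC =====
def Spec_unique_sum (n : List Int) (out : Option Int) : Prop := out = unique_sum_alt n
instance (n : List Int) (out : Option Int) : Decidable (Spec_unique_sum n out) := by unfold Spec_unique_sum; infer_instance

-- ===== CLAIM (what is proved, stated in full; the proofs are below) =====
def Claim_equal_unique_sum : Prop := ∀ (n : List Int), Dom_unique_sum n → Spec_unique_sum n (unique_sum n)

-- ===== LEMMAS AND PROOFS =====

/-- Sum contributed by B's loop: add `x` unless it equals the previous element. -/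
def skipSum : Option Int → List Int → Int
  | _, [] => 0
  | prev, x :: xs => (if prev = none ∨ prev ≠ some x then x else 0) + skipSum (some x) xs

theorem foldl_eq_skipSum (s : List Int) : ∀ (t : Int) (prev : Option Int),
    (s.foldl
      (fun (tp : Int × Option Int) x =>
        (if tp.2 = none ∨ tp.2 ≠ some x then tp.1 + x else tp.1, some x))
      (t, prev)).1 = t + skipSum prev s := by
  induction s with
  | nil => intro t prev; simp [skipSum]
  | cons x xs ih =>
    intro t prev
    simp only [List.foldl_cons, skipSum, ih]
    split_ifs <;> ring

theorem skipSum_some (s : List Int) (hs : s.Pairwise (· ≤ ·)) :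
    ∀ (p : Int), (∀ y ∈ s, p ≤ y) → skipSum (some p) s = ∑ x ∈ s.toFinset.erase p, x := by
  induction s with
  | nil => intro p _; simp [skipSum]
  | cons x xs ih =>
    intro p hp
    have hx : ∀ y ∈ xs, x ≤ y := List.pairwise_cons.mp hs |>.1
    have ih' := ih (List.pairwise_cons.mp hs).2 x hx
    by_cases hpx : p = x
    · subst hpx
      simp only [skipSum, List.toFinset_cons]
      rw [Finset.erase_insert_eq_erase, ih']
      simp
    · -- p < x, and p ∉ xs (else x ≤ p ≤ x forces p = x)
      have hpnotmem : p ∉ (x :: xs) := by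
        intro hmem
        rcases List.mem_cons.mp hmem with h | h
        · exact hpx h
        · exact hpx (le_antisymm (hp _ (List.mem_cons_self)) (hx _ h))
      have : skipSum (some p) (x :: xs) = x + ∑ y ∈ xs.toFinset.erase x, y := by
        simp only [skipSum, ih']
        have : ¬ (some p : Option Int) = some x := by simpa using hpx
        simp [this]
      rw [this]
      have herase : ((x :: xs).toFinset).erase p = (x :: xs).toFinset := by
        apply Finset.erase_eq_of_notMem
        simpa using hpnotmem
      rw [herase]
      have hins : (x :: xs).toFinset = insert x (xs.toFinset.erase x) := by
        ext y
        by_cases hyx : y = x <;> simp [hyx]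
      rw [hins, Finset.sum_insert (Finset.notMem_erase x _)]

theorem skipSum_none (s : List Int) (hs : s.Pairwise (· ≤ ·)) :
    skipSum none s = ∑ x ∈ s.toFinset, x := by
  cases s with
  | nil => simp [skipSum]
  | cons x xs =>
    have hx : ∀ y ∈ xs, x ≤ y := (List.pairwise_cons.mp hs).1
    have h := skipSum_some xs (List.pairwise_cons.mp hs).2 x hx
    simp only [skipSum, h]
    have hins : (x :: xs).toFinset = insert x (xs.toFinset.erase x) := by
      ext y
      by_cases hyx : y = x <;> simp [hyx]
    rw [hins, Finset.sum_insert (Finset.notMem_erase x _)]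
    simp

theorem ofList_sum_eq (n : List Int) :
    (PySem.Set.ofList n).foldl (fun counter i => counter + i) 0 = ∑ x ∈ n.toFinset, x := by
  have h1 : (PySem.Set.ofList n).foldl (fun counter i => counter + i) 0
      = (PySem.Set.ofList n).sum := List.sum_eq_foldl.symm
  have h2 : (PySem.Set.ofList n).toFinset = n.toFinset := by
    ext y; simp [PySem.Set.mem_ofList]
  have h3 := List.sum_toFinset (id : Int → Int) (PySem.Set.nodup_ofList (xs := n))
  rw [h1]
  have : ((PySem.Set.ofList n).map id).sum = (PySem.Set.ofList n).sum := by simp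
  rw [← this, ← h3, h2]
  rfl

-- ===== VERDICT (by name: the statement is the Claim_ definition above) =====
theorem unique_sum_spec : Claim_equal_unique_sum := by
  intro n _
  unfold Spec_unique_sum unique_sum unique_sum_alt
  by_cases hn : n.length = 0
  · simp [hn]
  · simp only [hn, if_false]
    rw [foldl_eq_skipSum, skipSum_none _ (PySem.List.sorted_pairwise (key := fun x => x) (xs := n)),
        ofList_sum_eq]
    have : (PySem.List.sorted n (fun x => x) false).toFinset = n.toFinset := by
      ext y; simp [PySem.List.mem_sorted]
    rw [this]
    simp
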